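-- pv_equiv track=rewrite | github.com/chytilp/running | src/core/aggregation_functions.py | _sum_sections
-- ===== SOURCE A (Python) =====
-- from typing import Any, Protocol
--
-- def _sum_sections(data: dict[str, Any], training: str, sections: list[str]) -> tuple[bool, int]:
--     sections_data: dict = data["trainings"][training]["sections"]
--     inputs: list[int] = []
--     for input_section in sections:
--         if input_section not in sections_data.keys():
--             return False, 0
--         inputs.append(data["trainings"][training]["sections"][input_section]["value"])
--     return True, sum(inputs)
-- ===== SOURCE B (Python) =====
-- def _sum_sections(data, training, sections):
--     sections_data = data["trainings"][training]["sections"]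
--     # multiplicity table of the requested sections
--     cnt = {}
--     for s in sections:
--         cnt[s] = cnt.get(s, 0) + 1
--     # traverse the DICT (not the request list): count how many of its keys are requested
--     matched = 0
--     for key in sections_data:
--         if key in cnt:
--             matched += 1
--     if matched < len(cnt):
--         return False, 0
--     # second dict traversal: each present key contributes its value once per request
--     total = 0
--     for key, item in sections_data.items():
--         if key in cnt:
--             total += cnt[key] * item["value"]
--     return True, total
-- ===== Notes on version B (the rewrite author's own statement) =====
-- stated objective: alternative
-- what changed: A makes one fused pass over the requested sections (presence check, early exit, list building, final sum); B instead builds a multiplicity table of the requests and then traverses the sections dictionary itself twice: counting how many of its keys are requested, and summing value*multiplicity per present key.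
import Mathlib
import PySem

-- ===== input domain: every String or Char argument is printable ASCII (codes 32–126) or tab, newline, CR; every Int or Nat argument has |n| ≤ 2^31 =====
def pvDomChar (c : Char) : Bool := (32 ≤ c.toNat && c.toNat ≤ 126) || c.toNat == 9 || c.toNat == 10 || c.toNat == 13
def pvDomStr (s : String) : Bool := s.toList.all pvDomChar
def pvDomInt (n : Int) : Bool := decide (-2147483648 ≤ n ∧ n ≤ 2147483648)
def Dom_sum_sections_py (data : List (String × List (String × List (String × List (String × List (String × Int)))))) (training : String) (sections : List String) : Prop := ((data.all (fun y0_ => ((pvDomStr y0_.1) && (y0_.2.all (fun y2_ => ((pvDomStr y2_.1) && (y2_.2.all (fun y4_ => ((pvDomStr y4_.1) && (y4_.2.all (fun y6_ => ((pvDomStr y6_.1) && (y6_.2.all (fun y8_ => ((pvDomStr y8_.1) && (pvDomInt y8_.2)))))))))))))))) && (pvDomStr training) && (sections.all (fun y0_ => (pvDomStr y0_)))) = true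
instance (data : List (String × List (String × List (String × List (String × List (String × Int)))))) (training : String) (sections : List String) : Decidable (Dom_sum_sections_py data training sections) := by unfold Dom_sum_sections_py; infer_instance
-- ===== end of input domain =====

-- B changes the algorithm's traversal: instead of A's single fused loop over the requested
-- sections, B builds a multiplicity table of the requests and then traverses the sections DICT
-- twice (count matched keys, then sum value·multiplicity); objective: alternative.

-- ===== PORT A =====
-- shared first line of both Pythons: sections_data = data["trainings"][training]["sections"]
def pvSectionsData (data : List (String × List (String × List (String × List (String × List (String × Int)))))) (training : String) : PySem.Dict String (List (String × Int)) :=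
  PySem.Dict.mk ((PySem.Dict.get? (PySem.Dict.mk ((PySem.Dict.get? (PySem.Dict.mk ((PySem.Dict.get? (PySem.Dict.mk data) "trainings").getD [])) training).getD [])) "sections").getD [])

-- the per-section value d[s]["value"] (KeyError impossible inside Pre_, defaulted to 0)
def pvSecValue (sd : PySem.Dict String (List (String × Int))) (s : String) : Int :=
  PySem.Dict.getD (PySem.Dict.mk (PySem.Dict.getD sd s [])) "value" 0

-- A's fused loop: check presence, early-return (False,0), append value; sum at the end
def pvALoop (sd : PySem.Dict String (List (String × Int))) (inputs : List Int) : List String → Bool × Int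
  | [] => (true, inputs.sum)
  | s :: rest =>
    if PySem.Dict.contains sd s = false then (false, 0)
    else pvALoop sd (inputs ++ [pvSecValue sd s]) rest

def sum_sections_py (data : List (String × List (String × List (String × List (String × List (String × Int)))))) (training : String) (sections : List String) : Bool × Int :=
  pvALoop (pvSectionsData data training) [] sections

-- ===== PORT B =====
-- cnt = {}; for s in sections: cnt[s] = cnt.get(s, 0) + 1
def pvCnt (sections : List String) : PySem.Dict String Int :=
  sections.foldl (fun d s => PySem.Dict.insert d s (PySem.Dict.getD d s 0 + 1)) PySem.Dict.empty

-- matched = 0; for key in sections_data: if key in cnt: matched += 1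
def pvMatched (sd : PySem.Dict String (List (String × Int))) (cnt : PySem.Dict String Int) : Int :=
  (PySem.Dict.keys sd).foldl (fun m k => if PySem.Dict.contains cnt k then m + 1 else m) 0

-- total = 0; for key, item in sections_data.items(): if key in cnt: total += cnt[key] * item["value"]
def pvTotal (sd : PySem.Dict String (List (String × Int))) (cnt : PySem.Dict String Int) : Int :=
  sd.items.foldl (fun t p => if PySem.Dict.contains cnt p.1 then t + PySem.Dict.getD cnt p.1 0 * PySem.Dict.getD (PySem.Dict.mk p.2) "value" 0 else t) 0

def sum_sections_py_alt (data : List (String × List (String × List (String × List (String × List (String × Int)))))) (training : String) (sections : List String) : Bool × Int :=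
  if pvMatched (pvSectionsData data training) (pvCnt sections) < (PySem.Dict.size (pvCnt sections) : Int) then (false, 0)
  else (true, pvTotal (pvSectionsData data training) (pvCnt sections))

-- ===== PRECONDITION & SPEC =====
-- Pre_ excludes (a) exactly the KeyError inputs of A — a missing "trainings"/training/"sections"
-- key, and a requested section, reached before any missing one, whose dict lacks "value" — and
-- (b) association lists with duplicate keys at any dict level, which do not encode any Python
-- dict (Python keeps the last duplicate, the association-list lookup the first).
def Pre_sum_sections_py (data : List (String × List (String × List (String × List (String × List (String × Int)))))) (training : String) (sections : List String) : Prop :=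
  PySem.Dict.contains (PySem.Dict.mk data) "trainings" = true ∧
  PySem.Dict.contains (PySem.Dict.mk ((PySem.Dict.get? (PySem.Dict.mk data) "trainings").getD [])) training = true ∧
  PySem.Dict.contains (PySem.Dict.mk ((PySem.Dict.get? (PySem.Dict.mk ((PySem.Dict.get? (PySem.Dict.mk data) "trainings").getD [])) training).getD [])) "sections" = true ∧
  (∀ s ∈ sections.takeWhile (fun s => PySem.Dict.contains (pvSectionsData data training) s),
    PySem.Dict.contains (PySem.Dict.mk (PySem.Dict.getD (pvSectionsData data training) s [])) "value" = true) ∧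
  (data.map Prod.fst).Nodup ∧
  (∀ p1 ∈ data, (p1.2.map Prod.fst).Nodup ∧
    ∀ p2 ∈ p1.2, (p2.2.map Prod.fst).Nodup ∧
      ∀ p3 ∈ p2.2, (p3.2.map Prod.fst).Nodup ∧
        ∀ p4 ∈ p3.2, (p4.2.map Prod.fst).Nodup)
instance (data : List (String × List (String × List (String × List (String × List (String × Int)))))) (training : String) (sections : List String) : Decidable (Pre_sum_sections_py data training sections) := by unfold Pre_sum_sections_py; infer_instance

def pvWitness_sum_sections_py : (List (String × List (String × List (String × List (String × List (String × Int)))))) × String × List String :=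
  ([("trainings", [("t", [("sections", [("a", [("value", 3)]), ("b", [("value", 4)])])])])], "t", ["a", "b", "a"])

def Spec_sum_sections_py (data : List (String × List (String × List (String × List (String × List (String × Int)))))) (training : String) (sections : List String) (out : Bool × Int) : Prop := out = sum_sections_py_alt data training sections
instance (data : List (String × List (String × List (String × List (String × List (String × Int)))))) (training : String) (sections : List String) (out : Bool × Int) : Decidable (Spec_sum_sections_py data training sections out) := by unfold Spec_sum_sections_py; infer_instance

-- ===== CLAIM (what is proved, stated in full; the proofs are below) =====
def Claim_equal_sum_sections_py : Prop := ∀ (data : List (String × List (String × List (String × List (String × List (String × Int)))))) (training : String) (sections : List String), Dom_sum_sections_py data training sections → Pre_sum_sections_py data training sections → Spec_sum_sections_py data training sections (sum_sections_py data training sections)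

-- ===== LEMMAS AND PROOFS =====

-- A's loop equals validate-then-sum over the request list
lemma aLoop_eq (sd : PySem.Dict String (List (String × Int))) :
    ∀ (sections : List String) (inputs : List Int),
      pvALoop sd inputs sections =
        if (sections.all (fun s => PySem.Dict.contains sd s)) = false then (false, 0)
        else (true, inputs.sum + (sections.map (fun s => pvSecValue sd s)).sum) := by
  intro sections
  induction sections with
  | nil => intro inputs; simp [pvALoop]
  | cons s rest ih =>
    intro inputs
    rcases hc : PySem.Dict.contains sd s with _ | _
    · simp [pvALoop, hc]
    · rw [pvALoop, if_neg (by simp [hc])]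
      rw [ih]
      rcases hall : rest.all (fun s => PySem.Dict.contains sd s) with _ | _
      · simp [hc, hall]
      · simp only [hc, hall, List.all_cons, Bool.true_and]
        simp [List.sum_append]
        ring

-- B's counter-building loop is Counter(sections)
lemma cnt_eq_counter (sections : List String) : pvCnt sections = PySem.Dict.counter sections :=
  PySem.Dict.foldl_insert_getD_add_one_eq_counter sections

-- B's first dict pass counts the keys that are requested
lemma matched_eq (sd : PySem.Dict String (List (String × Int))) (cnt : PySem.Dict String Int) :
    pvMatched sd cnt = (((PySem.Dict.keys sd).filter (fun k => PySem.Dict.contains cnt k)).length : Int) := by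
  unfold pvMatched
  have h : ∀ (l : List String) (m : Int),
      l.foldl (fun m k => if PySem.Dict.contains cnt k then m + 1 else m) m
        = m + ((l.filter (fun k => PySem.Dict.contains cnt k)).length : Int) := by
    intro l
    induction l with
    | nil => intro m; simp
    | cons k rest ih =>
      intro m
      by_cases hk : PySem.Dict.contains cnt k
      · simp [hk, ih]; ring
      · simp [hk, ih]
  rw [h]; ring

-- B's second dict pass as a mapped sum
lemma total_eq (sd : PySem.Dict String (List (String × Int))) (cnt : PySem.Dict String Int) :
    pvTotal sd cnt = (sd.items.map (fun p =>
      if PySem.Dict.contains cnt p.1 then PySem.Dict.getD cnt p.1 0 * PySem.Dict.getD (PySem.Dict.mk p.2) "value" 0 else 0)).sum := by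
  unfold pvTotal
  have h : ∀ (l : List (String × List (String × Int))) (t : Int),
      l.foldl (fun t p => if PySem.Dict.contains cnt p.1 then t + PySem.Dict.getD cnt p.1 0 * PySem.Dict.getD (PySem.Dict.mk p.2) "value" 0 else t) t
        = t + (l.map (fun p => if PySem.Dict.contains cnt p.1 then PySem.Dict.getD cnt p.1 0 * PySem.Dict.getD (PySem.Dict.mk p.2) "value" 0 else 0)).sum := by
    intro l
    induction l with
    | nil => intro t; simp
    | cons p rest ih =>
      intro t
      by_cases hp : PySem.Dict.contains cnt p.1
      · simp [hp, ih]; ring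
      · simp [hp, ih]
  rw [h]; ring

-- |l₁ ∩ l₂| is symmetric for Nodup lists
lemma filter_mem_length_comm (l₁ l₂ : List String) (h₁ : l₁.Nodup) (h₂ : l₂.Nodup) :
    (l₁.filter (fun k => decide (k ∈ l₂))).length = (l₂.filter (fun k => decide (k ∈ l₁))).length := by
  have e : ∀ (a b : List String), a.Nodup → b.Nodup →
      (a.filter (fun k => decide (k ∈ b))).length = (a.toFinset ∩ b.toFinset).card := by
    intro a b ha _
    rw [← List.toFinset_card_of_nodup (List.Nodup.filter _ ha), List.toFinset_filter]
    congr 1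
    rw [← Finset.filter_mem_eq_inter]
    apply Finset.filter_congr
    intro x _
    simp
  rw [e l₁ l₂ h₁ h₂, e l₂ l₁ h₂ h₁, Finset.inter_comm]

-- Σ_{k ∈ keys} (if k = s then v k else 0) = v s, for Nodup keys containing s
lemma sum_ite_single (keys : List String) (s : String) (v : String → Int)
    (hnd : keys.Nodup) (hs : s ∈ keys) :
    (keys.map (fun k => if k = s then v k else 0)).sum = v s := by
  induction keys with
  | nil => cases hs
  | cons k rest ih =>
    rcases List.nodup_cons.1 hnd with ⟨hk, hrest⟩
    by_cases h : k = s
    · subst h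
      have hz : (rest.map (fun x => if x = k then v x else 0)).sum = 0 := by
        apply List.sum_eq_zero
        intro x hx
        rcases List.mem_map.1 hx with ⟨y, hy, rfl⟩
        have hne : y ≠ k := by intro e; exact hk (e ▸ hy)
        simp [hne]
      simp [hz]
    · have hmem : s ∈ rest := by
        rcases List.mem_cons.1 hs with h' | h'
        · exact absurd h'.symm h
        · exact h'
      simp [h, ih hrest hmem]

-- the crux: summing count·value over the Nodup key list equals summing value over the requests
lemma sum_count_mul (keys : List String) (v : String → Int) (hnd : keys.Nodup) :
    ∀ (sections : List String), (∀ s ∈ sections, s ∈ keys) →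
      (keys.map (fun k => (sections.count k : Int) * v k)).sum = (sections.map v).sum := by
  intro sections
  induction sections with
  | nil => intro _; simp
  | cons s rest ih =>
    intro hsub
    have hs : s ∈ keys := hsub s (List.mem_cons_self)
    have hrest : ∀ x ∈ rest, x ∈ keys := fun x hx => hsub x (List.mem_cons_of_mem _ hx)
    have hsplit : ∀ k : String, ((s :: rest).count k : Int) * v k
        = (rest.count k : Int) * v k + (if k = s then v k else 0) := by
      intro k
      rw [List.count_cons]
      by_cases hk : k = s
      · simp [hk]; ring
      · have hsk : s ≠ k := fun e => hk e.symm
        simp [hk, hsk]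
    calc (keys.map (fun k => ((s :: rest).count k : Int) * v k)).sum
        = (keys.map (fun k => (rest.count k : Int) * v k + (if k = s then v k else 0))).sum := by
          congr 1; exact List.map_congr_left (fun k _ => hsplit k)
      _ = (keys.map (fun k => (rest.count k : Int) * v k)).sum + (keys.map (fun k => if k = s then v k else 0)).sum := by
          rw [← List.sum_map_add]
      _ = (rest.map v).sum + v s := by rw [ih hrest, sum_ite_single keys s v hnd hs]
      _ = ((s :: rest).map v).sum := by simp; ring

-- the sections dict has Nodup keys inside Pre_
lemma sd_keys_nodup (data : List (String × List (String × List (String × List (String × List (String × Int)))))) (training : String) (sections : List String)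
    (hpre : Pre_sum_sections_py data training sections) :
    (PySem.Dict.keys (pvSectionsData data training)).Nodup := by
  rcases hpre with ⟨h1, h2, h3, _, hnd0, hnd⟩
  unfold pvSectionsData
  rcases hg1 : PySem.Dict.get? (PySem.Dict.mk data) "trainings" with _ | v1
  · exfalso; rw [hg1] at h2; simp at h2
  · have hm1 : ("trainings", v1) ∈ data := by
      simpa using PySem.Dict.mem_items_of_get?_eq_some _ hg1
    rcases hg2 : PySem.Dict.get? (PySem.Dict.mk v1) training with _ | v2
    · exfalso; rw [hg1] at h3; simp only [Option.getD_some] at h3; rw [hg2] at h3; simp at h3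
    · have hm2 : (training, v2) ∈ v1 := by
        simpa using PySem.Dict.mem_items_of_get?_eq_some _ hg2
      rcases hg3 : PySem.Dict.get? (PySem.Dict.mk v2) "sections" with _ | v3
      · exfalso
        rw [hg1] at h3; simp only [Option.getD_some] at h3; rw [hg2] at h3
        simp only [Option.getD_some] at h3
        rw [PySem.Dict.contains_eq_isSome_get?, hg3] at h3
        simp at h3
      · have hm3 : ("sections", v3) ∈ v2 := by
          simpa using PySem.Dict.mem_items_of_get?_eq_some _ hg3
        have := (((hnd _ hm1).2 _ hm2).2 _ hm3).1
        simpa [hg1, hg2, hg3, PySem.Dict.keys] using this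

-- ===== VERDICT (by name: the statement is the Claim_ definition above) =====
theorem sum_sections_py_spec : Claim_equal_sum_sections_py := by
  intro data training sections _hdom hpre
  have hnd : (PySem.Dict.keys (pvSectionsData data training)).Nodup := sd_keys_nodup data training sections hpre
  unfold Spec_sum_sections_py sum_sections_py sum_sections_py_alt
  rw [aLoop_eq]
  set sd := pvSectionsData data training with hsd
  rw [cnt_eq_counter, matched_eq, total_eq]
  -- both presence tests are "every requested section is a key of sd"
  have hcontains : ∀ k, PySem.Dict.contains (PySem.Dict.counter sections) k = decide (k ∈ sections) := by
    intro k
    rw [PySem.Dict.contains_counter]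
    simp
  have hsize : (PySem.Dict.size (PySem.Dict.counter sections) : Int) = ((PySem.Set.ofList sections).length : Int) := by
    simp [PySem.Dict.size, PySem.Dict.items_counter]
  have hfilter : ((PySem.Dict.keys sd).filter (fun k => PySem.Dict.contains (PySem.Dict.counter sections) k)).length
      = ((PySem.Set.ofList sections).filter (fun k => decide (k ∈ PySem.Dict.keys sd))).length := by
    have h1 : ((PySem.Dict.keys sd).filter (fun k => PySem.Dict.contains (PySem.Dict.counter sections) k))
        = ((PySem.Dict.keys sd).filter (fun k => decide (k ∈ PySem.Set.ofList sections))) := by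
      apply List.filter_congr
      intro k _
      rw [hcontains]
      simp [PySem.Set.mem_ofList]
    rw [h1]
    exact filter_mem_length_comm _ _ hnd (PySem.Set.nodup_ofList sections)
  rcases hall : sections.all (fun s => PySem.Dict.contains sd s) with _ | _
  · -- some requested section is missing: both return (False, 0)
    rw [if_pos rfl]
    rcases List.all_eq_false.1 hall with ⟨s, hsmem, hsnot⟩
    have hlt : ((PySem.Set.ofList sections).filter (fun k => decide (k ∈ PySem.Dict.keys sd))).length
        < (PySem.Set.ofList sections).length := by
      rw [List.length_filter_lt_length_iff_exists]
      refine ⟨s, (PySem.Set.mem_ofList _ _).2 hsmem, ?_⟩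
      simp only [decide_eq_true_eq]
      intro hmem
      exact absurd ((PySem.Dict.contains_iff_mem_keys _ _).2 hmem) (by simpa using hsnot)
    rw [if_pos]
    rw [hfilter, hsize]
    exact_mod_cast hlt
  · -- all present: matched = len(cnt) and the two sums agree
    rw [if_neg (by simp)]
    have hsub : ∀ s ∈ sections, s ∈ PySem.Dict.keys sd := by
      intro s hs
      have := (List.all_eq_true.1 hall) s hs
      exact (PySem.Dict.contains_iff_mem_keys _ _).1 (by simpa using this)
    have hfull : ((PySem.Set.ofList sections).filter (fun k => decide (k ∈ PySem.Dict.keys sd))).length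
        = (PySem.Set.ofList sections).length := by
      rw [List.length_filter_eq_length_iff]
      intro a ha
      simpa using hsub a ((PySem.Set.mem_ofList _ _).1 ha)
    rw [if_neg (by rw [hfilter, hsize, hfull]; simp)]
    -- sums: rewrite items via keys, drop the redundant guard, apply sum_count_mul
    rw [PySem.Dict.items_eq_map_keys sd hnd []]
    rw [List.map_map]
    have hterm : ∀ k ∈ PySem.Dict.keys sd,
        ((fun p => if PySem.Dict.contains (PySem.Dict.counter sections) p.1 then PySem.Dict.getD (PySem.Dict.counter sections) p.1 0 * PySem.Dict.getD (PySem.Dict.mk p.2) "value" 0 else 0) ∘ fun k => (k, PySem.Dict.getD sd k []))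
          k = (sections.count k : Int) * pvSecValue sd k := by
      intro k _
      simp only [Function.comp, hcontains, PySem.Dict.getD_counter]
      by_cases hk : k ∈ sections
      · simp [hk, pvSecValue]
      · simp [hk, List.count_eq_zero.2 hk]
    rw [List.map_congr_left hterm]
    rw [sum_count_mul (PySem.Dict.keys sd) (pvSecValue sd) hnd sections hsub]
    simp
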